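-- pv_equiv track=rewrite | github.com/khm1102/BOJ | 백준/Gold/30015. 학생회 뽑기/학생회 뽑기.py | maximize_ability
-- ===== SOURCE A (Python) =====
-- def maximize_ability(N, K, A):
--     max_ability = 0
--     for bit in range(20, -1, -1):
--         count = 0
--         new_max_ability = max_ability | (1 << bit)
--
--         for i in range(N):
--             if (A[i] & new_max_ability) == new_max_ability:
--                 count += 1
--
--         if count >= K:
--             max_ability = new_max_ability
--
--     return max_ability
-- ===== SOURCE B (Python) =====
-- def maximize_ability(N, K, A):
--     # Binary trie over bits 20..0 with per-node pass counts; the greedy then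
--     # descends the trie with a frontier of nodes instead of scanning students.
--     root = [0, None, None]          # [count, child_bit0, child_bit1]
--     for i in range(N):
--         v = A[i]
--         node = root
--         node[0] += 1
--         for bit in range(20, -1, -1):
--             b = (v >> bit) & 1
--             if node[b + 1] is None:
--                 node[b + 1] = [0, None, None]
--             node = node[b + 1]
--             node[0] += 1
--     mask = 0
--     frontier = [root]
--     for bit in range(20, -1, -1):
--         ones = [n[2] for n in frontier if n[2] is not None]
--         if sum(n[0] for n in ones) >= K:
--             mask |= 1 << bit
--             frontier = ones
--         else:
--             frontier = [c for n in frontier for c in (n[1], n[2]) if c is not None]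
--     return mask
-- ===== Notes on version B (the rewrite author's own statement) =====
-- stated objective: alternative
-- what changed: B builds a binary trie of the students' bit patterns (bits 20..0) with per-node pass counts, then the greedy walks the trie with a frontier of nodes, summing subtree counts, instead of rescanning the student array with a mask test for every bit.
import Mathlib
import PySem

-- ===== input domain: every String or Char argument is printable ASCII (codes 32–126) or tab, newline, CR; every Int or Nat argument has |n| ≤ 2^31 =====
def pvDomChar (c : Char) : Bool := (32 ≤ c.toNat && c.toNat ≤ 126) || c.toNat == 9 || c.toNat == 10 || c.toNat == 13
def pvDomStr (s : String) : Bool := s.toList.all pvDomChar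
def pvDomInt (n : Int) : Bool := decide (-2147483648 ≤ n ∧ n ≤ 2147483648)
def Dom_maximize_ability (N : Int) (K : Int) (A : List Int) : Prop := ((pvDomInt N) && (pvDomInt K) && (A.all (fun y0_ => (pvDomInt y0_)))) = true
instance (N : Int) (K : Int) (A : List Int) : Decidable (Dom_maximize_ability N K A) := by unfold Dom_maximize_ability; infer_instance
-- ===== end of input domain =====

-- B replaces A's per-bit rescan of the student array by a counted binary trie of the
-- students' bit patterns, walked greedily with a frontier of nodes (objective: alternative).

-- ===== PORT A =====
-- 'A[i]' is ported with pyGetD (exact under Pre_, which keeps every index of range(N) in bounds);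
-- '1 << bit' is '1 <<< bit.toNat' (exact: bit runs over 20..0, all nonnegative).
def maximize_ability_step (K : Int) (N : Int) (A : List Int) (max_ability : Int) (bit : Int) : Int :=
  let new_max_ability := PySem.Int.bor max_ability ((1 : Int) <<< bit.toNat)
  let count := (PySem.List.pyRange 0 N).foldl
    (fun count i =>
      if PySem.Int.band (PySem.List.pyGetD A i 0) new_max_ability == new_max_ability
      then count + 1 else count) (0 : Int)
  if count ≥ K then new_max_ability else max_ability

def maximize_ability (N : Int) (K : Int) (A : List Int) : Int :=
  (PySem.List.pyRange 20 (-1) (-1)).foldl (maximize_ability_step K N A) 0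

-- ===== PORT B =====
-- The trie node [count, child0, child1] becomes the inductive PTrie; Python's 'None' child is
-- PTrie.nil. pvTrieInsert is the insertion loop (bump the count at each visited node, creating
-- missing children); '(v >> bit) & 1' (exact for negative v too via PySem.Int.band) selects the
-- child. The greedy loop keeps a frontier of nodes exactly as Source B's list 'frontier'.
inductive PTrie where
  | nil : PTrie
  | node : Int → PTrie → PTrie → PTrie
deriving DecidableEq, Repr

def pvBits (x : Int) : List Bool :=
  (PySem.List.pyRange 20 (-1) (-1)).map (fun bit => PySem.Int.band (x >>> bit.toNat) 1 != 0)

def pvTrieInsert : List Bool → PTrie → PTrie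
  | [], .nil => .node 1 .nil .nil
  | [], .node c l r => .node (c + 1) l r
  | b :: bs, .nil =>
      if b then .node 1 .nil (pvTrieInsert bs .nil) else .node 1 (pvTrieInsert bs .nil) .nil
  | b :: bs, .node c l r =>
      if b then .node (c + 1) l (pvTrieInsert bs r) else .node (c + 1) (pvTrieInsert bs l) r

def pvCnt : PTrie → Int
  | .nil => 0
  | .node c _ _ => c

-- 'n[2] if n[2] is not None'
def pvChild1 : PTrie → Option PTrie
  | .nil => none
  | .node _ _ .nil => none
  | .node _ _ (.node c l r) => some (.node c l r)

-- 'c for c in (n[1], n[2]) if c is not None'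
def pvChildren : PTrie → List PTrie
  | .nil => []
  | .node _ l r =>
      (match l with | .nil => [] | t => [t]) ++ (match r with | .nil => [] | t => [t])

-- 'sum(n[0] for n in ones)'
def pvSumCnt (ts : List PTrie) : Int := ts.foldl (fun s t => s + pvCnt t) 0

def maximize_ability_alt_step (K : Int) (s : Int × List PTrie) (bit : Int) : Int × List PTrie :=
  let ones := s.2.filterMap pvChild1
  if pvSumCnt ones ≥ K then (PySem.Int.bor s.1 ((1 : Int) <<< bit.toNat), ones)
  else (s.1, s.2.flatMap pvChildren)

def maximize_ability_alt (N : Int) (K : Int) (A : List Int) : Int :=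
  let root := (PySem.List.pyRange 0 N).foldl
    (fun t i => pvTrieInsert (pvBits (PySem.List.pyGetD A i 0)) t) (PTrie.node 0 .nil .nil)
  ((PySem.List.pyRange 20 (-1) (-1)).foldl (maximize_ability_alt_step K) ((0 : Int), [root])).1

-- ===== PRECONDITION & SPEC =====
-- Pre_ excludes exactly N > len(A), on which both Pythons raise IndexError.
def Pre_maximize_ability (N : Int) (K : Int) (A : List Int) : Prop :=
  N ≤ (A.length : Int)
instance (N : Int) (K : Int) (A : List Int) : Decidable (Pre_maximize_ability N K A) := by
  unfold Pre_maximize_ability; infer_instance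

def pvWitness_maximize_ability : Int × Int × List Int := (2, 1, [3, 5])

def Spec_maximize_ability (N : Int) (K : Int) (A : List Int) (out : Int) : Prop := out = maximize_ability_alt N K A
instance (N : Int) (K : Int) (A : List Int) (out : Int) : Decidable (Spec_maximize_ability N K A out) := by unfold Spec_maximize_ability; infer_instance

-- ===== CLAIM (what is proved, stated in full; the proofs are below) =====
def Claim_equal_maximize_ability : Prop := ∀ (N : Int) (K : Int) (A : List Int), Dom_maximize_ability N K A → Pre_maximize_ability N K A → Spec_maximize_ability N K A (maximize_ability N K A)

-- ===== LEMMAS AND PROOFS =====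

-- Python's bit test '(x >> b) & 1', in explicit two's-complement form.
def pvPbit (x : Int) (b : Nat) : Bool :=
  if 0 ≤ x then x.toNat.testBit b else !((-x - 1).toNat.testBit b)

theorem pvPbit_band_shift (x : Int) (b : Nat) :
    (PySem.Int.band (x >>> b) 1 != 0) = pvPbit x b := by
  cases x with
  | ofNat m =>
    show (PySem.Int.band (Int.ofNat (m >>> b)) 1 != 0) = _
    have h1 : PySem.Int.band (Int.ofNat (m >>> b)) 1 = ((m >>> b) &&& 1 : Nat) := by
      simpa using PySem.Int.band_natCast (m >>> b) 1
    rw [h1, Nat.and_one_is_mod]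
    have hp : pvPbit (Int.ofNat m) b = decide (m >>> b % 2 = 1) := by
      simp [pvPbit, Nat.testBit]
    rw [hp]
    rcases Nat.mod_two_eq_zero_or_one (m >>> b) with h | h <;> simp [h]
  | negSucc m =>
    show (PySem.Int.band (Int.negSucc (m >>> b)) 1 != 0) = _
    have hx : ∀ k : Nat, ¬ (0 ≤ Int.negSucc k) := fun k => not_le.mpr (Int.negSucc_lt_zero k)
    have harg : ∀ k : Nat, (-(Int.negSucc k) - 1) = (k : Int) := by
      intro k; rw [Int.negSucc_eq]; ring
    have h1 : PySem.Int.band (Int.negSucc (m >>> b)) 1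
        = ((1 - ((m >>> b) &&& 1) : Nat) : Int) := by
      unfold PySem.Int.band
      rw [if_neg (hx _), if_pos (by omega : (0:Int) ≤ 1), harg]
      simp only [Int.toNat_one, Int.toNat_natCast, Nat.and_comm]
    rw [h1, Nat.and_one_is_mod]
    have hp : pvPbit (Int.negSucc m) b = !decide (m >>> b % 2 = 1) := by
      unfold pvPbit
      rw [if_neg (hx _), harg, Int.toNat_natCast]
      simp [Nat.testBit]
    rw [hp]
    rcases Nat.mod_two_eq_zero_or_one (m >>> b) with h | h <;> simp [h]

theorem nat_and_self_iff (n M : Nat) :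
    n &&& M = M ↔ ∀ k, M.testBit k = true → n.testBit k = true := by
  constructor
  · intro h k hk
    have := congrArg (fun t => t.testBit k) h
    simp only [Nat.testBit_and, hk, Bool.and_true] at this
    exact this
  · intro h
    apply Nat.eq_of_testBit_eq
    intro k
    rw [Nat.testBit_and]
    cases hk : M.testBit k
    · simp
    · simp [h k hk]

theorem nat_and_zero_iff (M y : Nat) :
    M &&& y = 0 ↔ ∀ k, M.testBit k = true → y.testBit k = false := by
  constructor
  · intro h k hk
    have := congrArg (fun t => t.testBit k) h
    simp only [Nat.testBit_and, Nat.zero_testBit, hk, Bool.true_and] at this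
    exact this
  · intro h
    apply Nat.eq_of_testBit_eq
    intro k
    rw [Nat.testBit_and, Nat.zero_testBit]
    cases hk : M.testBit k
    · simp
    · simp [h k hk]

theorem band_mask_eq_iff (x : Int) (M : Nat) :
    (PySem.Int.band x (M : Int) == (M : Int)) = true ↔
      ∀ k, M.testBit k = true → pvPbit x k = true := by
  cases x with
  | ofNat n =>
    have h1 : PySem.Int.band (Int.ofNat n) (M : Int) = ((n &&& M : Nat) : Int) := by
      simpa using PySem.Int.band_natCast n M
    have hp : ∀ k, pvPbit (Int.ofNat n) k = n.testBit k := by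
      intro k; simp [pvPbit]
    simp only [h1, beq_iff_eq, Nat.cast_inj, hp]
    exact nat_and_self_iff n M
  | negSucc n =>
    have hx : ¬ (0 ≤ Int.negSucc n) := not_le.mpr (Int.negSucc_lt_zero n)
    have harg : (-(Int.negSucc n) - 1) = (n : Int) := by rw [Int.negSucc_eq]; ring
    have h1 : PySem.Int.band (Int.negSucc n) (M : Int) = ((M - (M &&& n) : Nat) : Int) := by
      unfold PySem.Int.band
      rw [if_neg hx, if_pos (by omega : (0:Int) ≤ (M:Int)), harg]
      simp only [Int.toNat_natCast]
    have hp : ∀ k, pvPbit (Int.negSucc n) k = !(n.testBit k) := by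
      intro k; unfold pvPbit; rw [if_neg hx, harg, Int.toNat_natCast]
    have hle : M &&& n ≤ M := Nat.and_le_left
    simp only [h1, beq_iff_eq, Nat.cast_inj, hp]
    constructor
    · intro h k hk
      have hz : M &&& n = 0 := by omega
      simpa using (nat_and_zero_iff M n).mp hz k hk
    · intro h
      have hz : M &&& n = 0 := (nat_and_zero_iff M n).mpr (by intro k hk; simpa using h k hk)
      omega

theorem mask_split (x : Int) (m b : Nat) :
    (∀ k, (m ||| 2 ^ b).testBit k = true → pvPbit x k = true) ↔
      ((∀ k, m.testBit k = true → pvPbit x k = true) ∧ pvPbit x b = true) := by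
  constructor
  · intro h
    refine ⟨fun k hk => h k ?_, h b ?_⟩
    · simp [Nat.testBit_or, hk]
    · simp [Nat.testBit_or]
  · rintro ⟨h1, h2⟩ k hk
    rw [Nat.testBit_or, Nat.testBit_two_pow] at hk
    rcases Bool.or_eq_true_iff.mp hk with hk | hk
    · exact h1 k hk
    · have : b = k := of_decide_eq_true hk
      exact this ▸ h2

-- Bool form: the test against mask m|2^b is the test against m plus bit b.
theorem band_or_pow (x : Int) (m b : Nat) :
    (PySem.Int.band x ((m ||| 2 ^ b : Nat) : Int) == ((m ||| 2 ^ b : Nat) : Int))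
      = ((PySem.Int.band x (m : Int) == (m : Int)) && pvPbit x b) := by
  rw [Bool.eq_iff_iff, Bool.and_eq_true, band_mask_eq_iff, band_mask_eq_iff, mask_split]

theorem count_filter_eq (p : Int → Bool) (g : Int → Int) :
    ∀ (l : List Int) (c : Int),
      l.foldl (fun count i => if p (g i) then count + 1 else count) c
        = c + (((l.map g).filter p).length : Int) := by
  intro l
  induction l with
  | nil => intro c; simp
  | cons hd tl ih =>
    intro c
    simp only [List.foldl_cons, List.map_cons, List.filter_cons]
    rcases h : p (g hd) <;> simp [h, ih] <;> push_cast <;> ring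

-- ----- patterns over bit strings: the proof's view of the trie -----

-- a pattern entry: 'some c' demands bit value c, 'none' is a wildcard
def pvMatch : List (Option Bool) → List Bool → Bool
  | [], _ => true
  | _ :: _, [] => false
  | o :: p, b :: bs => (match o with | none => true | some c => c == b) && pvMatch p bs

def pvCntMatch : List (Option Bool) → PTrie → Int
  | [], t => pvCnt t
  | _ :: _, .nil => 0
  | o :: p, .node _ l r =>
      match o with
      | some true => pvCntMatch p r
      | some false => pvCntMatch p l
      | none => pvCntMatch p l + pvCntMatch p r

def pvNodes : List (Option Bool) → PTrie → List PTrie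
  | _, .nil => []
  | [], t => [t]
  | o :: p, .node _ l r =>
      match o with
      | some true => pvNodes p r
      | some false => pvNodes p l
      | none => pvNodes p l ++ pvNodes p r

theorem pvCntMatch_nil (p : List (Option Bool)) : pvCntMatch p PTrie.nil = 0 := by
  cases p <;> rfl

theorem pvNodes_nil (p : List (Option Bool)) : pvNodes p PTrie.nil = [] := by
  cases p <;> rfl

theorem pvSumCnt_eq (ts : List PTrie) : pvSumCnt ts = (ts.map pvCnt).sum := by
  simp [pvSumCnt, PySem.List.foldl_add]

theorem pvSumCnt_append (a b : List PTrie) :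
    pvSumCnt (a ++ b) = pvSumCnt a + pvSumCnt b := by
  simp [pvSumCnt_eq]

theorem pvSumCnt_nodes (p : List (Option Bool)) :
    ∀ t : PTrie, pvSumCnt (pvNodes p t) = pvCntMatch p t := by
  induction p with
  | nil =>
    intro t; cases t
    · simp [pvNodes_nil, pvSumCnt, pvCntMatch_nil]
    · simp [pvNodes, pvCntMatch, pvSumCnt]
  | cons o p ih =>
    intro t; cases t with
    | nil => simp [pvNodes_nil, pvSumCnt, pvCntMatch_nil]
    | node c l r =>
      rcases o with _ | b
      · simp [pvNodes, pvCntMatch, pvSumCnt_append, ih]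
      · cases b <;> simp [pvNodes, pvCntMatch, ih]

theorem pvNodes_child1 (p : List (Option Bool)) :
    ∀ t : PTrie, (pvNodes p t).filterMap pvChild1 = pvNodes (p ++ [some true]) t := by
  induction p with
  | nil =>
    intro t; cases t with
    | nil => simp [pvNodes_nil]
    | node c l r =>
      cases r <;> simp [pvNodes, pvChild1]
  | cons o p ih =>
    intro t; cases t with
    | nil => simp [pvNodes_nil]
    | node c l r =>
      rcases o with _ | b
      · simp [pvNodes, List.filterMap_append, ih]
      · cases b <;> simp [pvNodes, ih]

theorem pvNodes_children (p : List (Option Bool)) :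
    ∀ t : PTrie, (pvNodes p t).flatMap pvChildren = pvNodes (p ++ [none]) t := by
  induction p with
  | nil =>
    intro t; cases t with
    | nil => simp [pvNodes_nil]
    | node c l r =>
      cases l <;> cases r <;> simp [pvNodes, pvChildren]
  | cons o p ih =>
    intro t; cases t with
    | nil => simp [pvNodes_nil]
    | node c l r =>
      rcases o with _ | b
      · simp [pvNodes, List.flatMap_append, ih]
      · cases b <;> simp [pvNodes, ih]

theorem pvCntMatch_insert :
    ∀ (bs : List Bool) (p : List (Option Bool)) (t : PTrie), p.length ≤ bs.length →
      pvCntMatch p (pvTrieInsert bs t)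
        = pvCntMatch p t + (if pvMatch p bs then 1 else 0) := by
  intro bs
  induction bs with
  | nil =>
    intro p t hlen
    have hp : p = [] := List.eq_nil_of_length_eq_zero (by simpa using hlen)
    subst hp
    cases t <;> simp [pvTrieInsert, pvCntMatch, pvCnt, pvMatch]
  | cons b bs ih =>
    intro p t hlen
    cases p with
    | nil =>
      cases t <;> cases b <;> simp [pvTrieInsert, pvCntMatch, pvCnt, pvMatch]
    | cons o p =>
      have hlen' : p.length ≤ bs.length := by simpa using hlen
      cases t with
      | nil =>
        rcases o with _ | c
        · cases b <;> rcases hm : pvMatch p bs <;>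
            simp [pvTrieInsert, pvCntMatch, pvMatch, pvCntMatch_nil, hm,
              ih p PTrie.nil hlen']
        · cases b <;> cases c <;> rcases hm : pvMatch p bs <;>
            simp [pvTrieInsert, pvCntMatch, pvMatch, pvCntMatch_nil, hm,
              ih p PTrie.nil hlen']
      | node cc l r =>
        rcases o with _ | c
        · cases b <;> rcases hm : pvMatch p bs <;>
            simp [pvTrieInsert, pvCntMatch, pvMatch, hm, ih p l hlen', ih p r hlen'] <;> ring
        · cases b <;> cases c <;> rcases hm : pvMatch p bs <;>
            simp [pvTrieInsert, pvCntMatch, pvMatch, hm, ih p l hlen', ih p r hlen']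

theorem pvBits_length (x : Int) : (pvBits x).length = 21 := by
  unfold pvBits
  rw [List.length_map, PySem.List.length_pyRange_neg_one]
  decide

theorem pvCntMatch_build (p : List (Option Bool)) (hp : p.length ≤ 21) :
    ∀ (L : List Int) (t0 : PTrie),
      pvCntMatch p (L.foldl (fun t v => pvTrieInsert (pvBits v) t) t0)
        = pvCntMatch p t0 + ((L.filter (fun v => pvMatch p (pvBits v))).length : Int) := by
  intro L
  induction L with
  | nil => intro t0; simp
  | cons v L ih =>
    intro t0
    simp only [List.foldl_cons, List.filter_cons]
    rw [ih, pvCntMatch_insert (pvBits v) p t0 (by rw [pvBits_length]; exact hp)]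
    rcases h : pvMatch p (pvBits v) <;> simp [h] <;> push_cast <;> ring

theorem pvCntMatch_root0 (p : List (Option Bool)) :
    pvCntMatch p (PTrie.node 0 PTrie.nil PTrie.nil) = 0 := by
  cases p with
  | nil => rfl
  | cons o p => rcases o with _ | b
                · simp [pvCntMatch, pvCntMatch_nil]
                · cases b <;> simp [pvCntMatch, pvCntMatch_nil]

theorem pvBits_eq (x : Int) :
    pvBits x = [pvPbit x 20, pvPbit x 19, pvPbit x 18, pvPbit x 17, pvPbit x 16,
      pvPbit x 15, pvPbit x 14, pvPbit x 13, pvPbit x 12, pvPbit x 11, pvPbit x 10,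
      pvPbit x 9, pvPbit x 8, pvPbit x 7, pvPbit x 6, pvPbit x 5, pvPbit x 4,
      pvPbit x 3, pvPbit x 2, pvPbit x 1, pvPbit x 0] := by
  have hr : PySem.List.pyRange 20 (-1) (-1)
      = [((20 : Nat) : Int), ((19 : Nat) : Int), ((18 : Nat) : Int), ((17 : Nat) : Int), ((16 : Nat) : Int), ((15 : Nat) : Int), ((14 : Nat) : Int), ((13 : Nat) : Int), ((12 : Nat) : Int), ((11 : Nat) : Int), ((10 : Nat) : Int), ((9 : Nat) : Int), ((8 : Nat) : Int), ((7 : Nat) : Int), ((6 : Nat) : Int), ((5 : Nat) : Int), ((4 : Nat) : Int), ((3 : Nat) : Int), ((2 : Nat) : Int), ((1 : Nat) : Int), ((0 : Nat) : Int)] := by decide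
  simp only [pvBits, hr, List.map_cons, List.map_nil, Int.toNat_natCast,
    Int.shiftRight_natCast_right, pvPbit_band_shift]

theorem pvBits_getD (x : Int) (b : Nat) (hb : b ≤ 20) :
    (pvBits x).getD (20 - b) false = pvPbit x b := by
  interval_cases b <;> simp [pvBits_eq, List.getD]

theorem pvMatch_append_none :
    ∀ (p : List (Option Bool)) (bs : List Bool), p.length < bs.length →
      pvMatch (p ++ [none]) bs = pvMatch p bs := by
  intro p
  induction p with
  | nil => intro bs h; cases bs with
           | nil => simp at h
           | cons b bs => simp [pvMatch]
  | cons o p ih =>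
    intro bs h
    cases bs with
    | nil => simp at h
    | cons b bs =>
      simp only [List.cons_append, pvMatch]
      rw [ih bs (by simpa using h)]

theorem pvMatch_append_true :
    ∀ (p : List (Option Bool)) (bs : List Bool), p.length < bs.length →
      pvMatch (p ++ [some true]) bs = (pvMatch p bs && bs.getD p.length false) := by
  intro p
  induction p with
  | nil => intro bs h; cases bs with
           | nil => simp at h
           | cons b bs => simp [pvMatch, List.getD]
  | cons o p ih =>
    intro bs h
    cases bs with
    | nil => simp at h
    | cons b bs =>
      simp only [List.cons_append, pvMatch, List.length_cons, List.getD_cons_succ]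
      rw [ih bs (by simpa using h), Bool.and_assoc]

theorem pvTrieInsert_node (bs : List Bool) (c : Int) (l r : PTrie) :
    ∃ c' l' r', pvTrieInsert bs (PTrie.node c l r) = PTrie.node c' l' r' := by
  cases bs with
  | nil => exact ⟨c + 1, l, r, rfl⟩
  | cons b bs =>
    cases b
    · exact ⟨c + 1, pvTrieInsert bs l, r, rfl⟩
    · exact ⟨c + 1, l, pvTrieInsert bs r, rfl⟩

theorem pvBuild_node (L : List Int) :
    ∀ (c : Int) (l r : PTrie), ∃ c' l' r',
      L.foldl (fun t v => pvTrieInsert (pvBits v) t) (PTrie.node c l r) = PTrie.node c' l' r' := by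
  induction L with
  | nil => intro c l r; exact ⟨c, l, r, rfl⟩
  | cons v L ih =>
    intro c l r
    obtain ⟨c1, l1, r1, h1⟩ := pvTrieInsert_node (pvBits v) c l r
    simpa [h1] using ih c1 l1 r1

-- The main loop invariant: the frontier is pvNodes p root for a pattern p equivalent
-- to the mask built so far, and both folds then move in lockstep.
theorem main_fold (N K : Int) (A : List Int) (root : PTrie)
    (hroot : root = ((PySem.List.pyRange 0 N).map (fun i => PySem.List.pyGetD A i 0)).foldl
        (fun t v => pvTrieInsert (pvBits v) t) (PTrie.node 0 PTrie.nil PTrie.nil)) :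
    ∀ (n : Nat), n ≤ 21 → ∀ (m : Nat) (p : List (Option Bool)),
      p.length = 21 - n →
      (∀ x : Int, (PySem.Int.band x (m : Int) == (m : Int)) = pvMatch p (pvBits x)) →
      (PySem.List.pyRange ((n : Int) - 1) (-1) (-1)).foldl (maximize_ability_step K N A) (m : Int)
        = ((PySem.List.pyRange ((n : Int) - 1) (-1) (-1)).foldl (maximize_ability_alt_step K)
            ((m : Int), pvNodes p root)).1 := by
  intro n
  induction n with
  | zero =>
    intro _ m p _ _
    rw [PySem.List.pyRange_neg_one_eq_nil (by norm_num : ((0:Nat):Int) - 1 ≤ -1)]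
    simp
  | succ n ih =>
    intro hn m p hplen hpinv
    have hb : ((n + 1 : Nat) : Int) - 1 = (n : Int) := by push_cast; ring
    rw [hb, PySem.List.pyRange_neg_one_cons (by omega : (-1 : Int) < (n : Int))]
    simp only [List.foldl_cons]
    -- the new mask and its Nat form
    have hshift : ((1 : Int) <<< (n : Int).toNat) = ((2 ^ n : Nat) : Int) := by
      show Int.ofNat (1 <<< (n : Int).toNat) = _
      norm_num [Nat.shiftLeft_eq]
    have hmask : PySem.Int.bor (m : Int) ((1 : Int) <<< (n : Int).toNat)
        = ((m ||| 2 ^ n : Nat) : Int) := by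
      rw [hshift]; exact PySem.Int.bor_natCast m (2 ^ n)
    -- the extended pattern matches exactly the new mask
    have hplen' : p.length = 20 - n := by omega
    have hn20 : n ≤ 20 := by omega
    have hbitlen : p.length < 21 := by omega
    have hext : ∀ x : Int,
        (PySem.Int.band x ((m ||| 2 ^ n : Nat) : Int) == ((m ||| 2 ^ n : Nat) : Int))
          = pvMatch (p ++ [some true]) (pvBits x) := by
      intro x
      rw [band_or_pow, hpinv x,
        pvMatch_append_true p (pvBits x) (by rw [pvBits_length]; exact hbitlen), hplen',
        pvBits_getD x n hn20]
    -- A's count equals the summed subtree counts of the ones-frontier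
    have hLcnt := pvCntMatch_build (p ++ [some true]) (by simp; omega)
        ((PySem.List.pyRange 0 N).map (fun i => PySem.List.pyGetD A i 0))
        (PTrie.node 0 PTrie.nil PTrie.nil)
    have hcnt : pvSumCnt ((pvNodes p root).filterMap pvChild1)
        = ((((PySem.List.pyRange 0 N).map (fun i => PySem.List.pyGetD A i 0)).filter
            (fun v => pvMatch (p ++ [some true]) (pvBits v))).length : Int) := by
      rw [pvNodes_child1, pvSumCnt_nodes, hroot, hLcnt, pvCntMatch_root0, zero_add]
    have hAcount : (PySem.List.pyRange 0 N).foldl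
        (fun count i =>
          if PySem.Int.band (PySem.List.pyGetD A i 0) ((m ||| 2 ^ n : Nat) : Int)
              == ((m ||| 2 ^ n : Nat) : Int)
          then count + 1 else count) (0 : Int)
        = pvSumCnt ((pvNodes p root).filterMap pvChild1) := by
      rw [count_filter_eq
          (fun v => PySem.Int.band v ((m ||| 2 ^ n : Nat) : Int) == ((m ||| 2 ^ n : Nat) : Int))
          (fun i => PySem.List.pyGetD A i 0) (PySem.List.pyRange 0 N) 0, zero_add, hcnt]
      congr 1
      exact congrArg _ (List.filter_congr (fun x _ => hext x))
    -- both steps, in the same shape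
    have hstepA : maximize_ability_step K N A (m : Int) (n : Int)
        = if pvSumCnt ((pvNodes p root).filterMap pvChild1) ≥ K
          then ((m ||| 2 ^ n : Nat) : Int) else (m : Int) := by
      simp only [maximize_ability_step, hmask]
      rw [hAcount]
    have hstepB : maximize_ability_alt_step K ((m : Int), pvNodes p root) (n : Int)
        = if pvSumCnt ((pvNodes p root).filterMap pvChild1) ≥ K
          then (((m ||| 2 ^ n : Nat) : Int), pvNodes (p ++ [some true]) root)
          else ((m : Int), pvNodes (p ++ [none]) root) := by
      simp only [maximize_ability_alt_step, hmask, pvNodes_child1, pvNodes_children]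
    rw [hstepA, hstepB]
    by_cases hK : pvSumCnt ((pvNodes p root).filterMap pvChild1) ≥ K
    · rw [if_pos hK, if_pos hK]
      exact ih (by omega) (m ||| 2 ^ n) (p ++ [some true]) (by simp; omega) hext
    · rw [if_neg hK, if_neg hK]
      refine ih (by omega) m (p ++ [none]) (by simp; omega) ?_
      intro x
      rw [hpinv x, pvMatch_append_none p (pvBits x) (by rw [pvBits_length]; exact hbitlen)]

-- ===== VERDICT (by name: the statement is the Claim_ definition above) =====
theorem maximize_ability_spec : Claim_equal_maximize_ability := by
  intro N K A _hD _hPre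
  show maximize_ability N K A = maximize_ability_alt N K A
  have hfold : (PySem.List.pyRange 0 N).foldl
      (fun t i => pvTrieInsert (pvBits (PySem.List.pyGetD A i 0)) t)
      (PTrie.node 0 PTrie.nil PTrie.nil)
      = ((PySem.List.pyRange 0 N).map (fun i => PySem.List.pyGetD A i 0)).foldl
          (fun t v => pvTrieInsert (pvBits v) t) (PTrie.node 0 PTrie.nil PTrie.nil) := by
    rw [List.foldl_map]
  obtain ⟨c, l, r, hnode⟩ := pvBuild_node
    ((PySem.List.pyRange 0 N).map (fun i => PySem.List.pyGetD A i 0)) 0 PTrie.nil PTrie.nil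
  have h := main_fold N K A (PTrie.node c l r) hnode.symm 21 (le_refl 21) 0 []
    (by simp) (by intro x; simp [PySem.Int.band_zero, pvMatch])
  have hrng : ((21 : Nat) : Int) - 1 = (20 : Int) := by norm_num
  rw [hrng] at h
  unfold maximize_ability
  simp only [maximize_ability_alt]
  rw [hfold, hnode]
  simpa [pvNodes] using h
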